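-- pv_equiv track=rewrite | github.com/davkhech/ssdnacnt | number_of_contacts.py | repartition_based_on_definition
-- ===== SOURCE A (Python) =====
-- def repartition_based_on_definition(bucket, definition):
--     max_index = -1
--     residue_index_map = {}
--     partitions = []
--     if definition == 1:
--         for elem in bucket:
--             if elem[0] not in residue_index_map:
--                 partitions.append([])
--                 max_index += 1
--                 residue_index_map[elem[0]] = max_index
--             partitions[max_index].append(elem[1])
--     else:
--         partitions.append([])
--         for elem in bucket:
--             partitions[0].append(elem[1])
--     return partitions
-- ===== SOURCE B (Python) =====
-- def repartition_based_on_definition(bucket, definition):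
--     if definition != 1:
--         return [[elem[1] for elem in bucket]]
--     starts = []
--     seen = set()
--     for i, (key, _) in enumerate(bucket):
--         if key not in seen:
--             seen.add(key)
--             starts.append(i)
--     ends = starts[1:] + [len(bucket)]
--     return [[elem[1] for elem in bucket[s:e]] for s, e in zip(starts, ends)]
-- ===== Notes on version B (the rewrite author's own statement) =====
-- stated objective: alternative
-- what changed: Replaces A's incremental dict-of-indices append-to-latest-partition loop with a two-phase boundary detection: one pass records the index of each key's first occurrence, then the partitions are produced by slicing the bucket between consecutive boundary indices.
import Mathlib
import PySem

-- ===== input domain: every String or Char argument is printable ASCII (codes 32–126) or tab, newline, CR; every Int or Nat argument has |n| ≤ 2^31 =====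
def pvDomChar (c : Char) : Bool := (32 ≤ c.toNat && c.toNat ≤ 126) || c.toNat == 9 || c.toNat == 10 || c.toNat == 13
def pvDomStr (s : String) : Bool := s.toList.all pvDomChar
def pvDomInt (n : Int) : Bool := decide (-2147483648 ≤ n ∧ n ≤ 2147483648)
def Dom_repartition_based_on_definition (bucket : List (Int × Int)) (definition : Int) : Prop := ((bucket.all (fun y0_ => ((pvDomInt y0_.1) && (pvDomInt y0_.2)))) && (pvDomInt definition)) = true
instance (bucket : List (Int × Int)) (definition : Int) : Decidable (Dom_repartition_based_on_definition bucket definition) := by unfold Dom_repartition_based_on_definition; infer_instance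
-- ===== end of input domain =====

-- B replaces A's incremental append-to-latest-partition loop by boundary detection:
-- one pass records first-occurrence indices, then partitions are slices between
-- consecutive boundaries (same cost, different decomposition; objective: alternative).

-- ===== PORT A =====
-- partitions[max_index].append(v): List.modify at max_index.toNat; max_index is ≥ 0 at
-- every use (the first element always inserts a partition first), so .toNat is exact here.
def repartition_based_on_definition (bucket : List (Int × Int)) (definition : Int) : List (List Int) :=
  if definition = 1 then
    (bucket.foldl
      (fun (st : Int × PySem.Dict Int Int × List (List Int)) elem =>
        let st' :=
          if st.2.1.contains elem.1 then st
          else (st.1 + 1, st.2.1.insert elem.1 (st.1 + 1), st.2.2 ++ [[]])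
        (st'.1, st'.2.1, st'.2.2.modify st'.1.toNat (fun g => g ++ [elem.2])))
      (-1, PySem.Dict.empty, [])).2.2
  else
    bucket.foldl (fun (parts : List (List Int)) elem => parts.modify 0 (fun g => g ++ [elem.2])) [[]]

-- ===== PORT B =====
def repartition_based_on_definition_alt (bucket : List (Int × Int)) (definition : Int) : List (List Int) :=
  if definition ≠ 1 then [bucket.map (·.2)]
  else
    -- for i, (key, _) in enumerate(bucket): if key not in seen: seen.add(key); starts.append(i)
    let st := (PySem.List.enumerate bucket 0).foldl
      (fun (ac : List Int × PySem.Set Int) p =>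
        if ac.2.contains p.2.1 then ac else (ac.1 ++ [p.1], ac.2.add p.2.1))
      ([], PySem.Set.empty)
    let starts := st.1
    -- ends = starts[1:] + [len(bucket)]
    let ends := PySem.List.slice starts (some 1) none ++ [(bucket.length : Int)]
    -- [[elem[1] for elem in bucket[s:e]] for s, e in zip(starts, ends)]
    (starts.zip ends).map (fun se => (PySem.List.slice bucket (some se.1) (some se.2)).map (·.2))

-- ===== PRECONDITION & SPEC =====
def Spec_repartition_based_on_definition (bucket : List (Int × Int)) (definition : Int) (out : List (List Int)) : Prop := out = repartition_based_on_definition_alt bucket definition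
instance (bucket : List (Int × Int)) (definition : Int) (out : List (List Int)) : Decidable (Spec_repartition_based_on_definition bucket definition out) := by unfold Spec_repartition_based_on_definition; infer_instance

-- ===== CLAIM (what is proved, stated in full; the proofs are below) =====
def Claim_equal_repartition_based_on_definition : Prop := ∀ (bucket : List (Int × Int)) (definition : Int), Dom_repartition_based_on_definition bucket definition → Spec_repartition_based_on_definition bucket definition (repartition_based_on_definition bucket definition)

-- ===== LEMMAS AND PROOFS =====

-- canonical run-splitter both ports are proved equal to
def runTake (seen : PySem.Set Int) : List (Int × Int) → List Int × List (Int × Int)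
  | [] => ([], [])
  | (k, v) :: rest =>
    if seen.contains k then
      let p := runTake seen rest
      (v :: p.1, p.2)
    else ([], (k, v) :: rest)

theorem runTake_length (seen : PySem.Set Int) (l : List (Int × Int)) :
    (runTake seen l).2.length ≤ l.length := by
  induction l with
  | nil => simp [runTake]
  | cons x r ih =>
    obtain ⟨k, v⟩ := x
    by_cases h : k ∈ seen
    · have h' : seen.contains k = true := (PySem.Set.contains_iff _ _).mpr h
      simp only [runTake, h', if_pos]
      exact Nat.le_succ_of_le ih
    · simp [runTake, h]

def runGo (seen : PySem.Set Int) : List (Int × Int) → List (List Int)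
  | [] => []
  | (k, v) :: rest =>
    let seen' := seen.add k
    let p := runTake seen' rest
    (v :: p.1) :: runGo seen' p.2
termination_by l => l.length
decreasing_by exact Nat.lt_succ_of_le (runTake_length _ _)

theorem modify_append_middle (f : List Int → List Int) (ps : List (List Int)) (cur : List Int) (tl : List (List Int)) :
    (ps ++ cur :: tl).modify ps.length f = ps ++ f cur :: tl := by
  induction ps with
  | nil => simp [List.modify]
  | cons p ps ih =>
    simp only [List.modify] at ih ⊢
    simpa using ih

theorem set_contains_add (s : PySem.Set Int) (x y : Int) :
    (s.add x).contains y = (s.contains y || y == x) := by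
  by_cases hx : x ∈ s
  · by_cases hy : y = x
    · subst hy
      simp [PySem.Set.add, hx, PySem.Set.contains]
    · simp [PySem.Set.add, hx, hy]
  · simp [PySem.Set.add, PySem.Set.contains, hx]
    by_cases hy : y = x <;> simp [hy]

-- A's loop computes runGo
theorem loopA (rest : List (Int × Int)) (ps : List (List Int)) (cur : List Int)
    (rim : PySem.Dict Int Int) (seen : PySem.Set Int)
    (h : ∀ k, rim.contains k = seen.contains k) :
    (rest.foldl
      (fun (st : Int × PySem.Dict Int Int × List (List Int)) elem =>
        let st' :=
          if st.2.1.contains elem.1 then st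
          else (st.1 + 1, st.2.1.insert elem.1 (st.1 + 1), st.2.2 ++ [[]])
        (st'.1, st'.2.1, st'.2.2.modify st'.1.toNat (fun g => g ++ [elem.2])))
      ((ps.length : Int), rim, ps ++ [cur])).2.2
    = ps ++ (cur ++ (runTake seen rest).1) :: runGo seen (runTake seen rest).2 := by
  induction rest generalizing ps cur rim seen with
  | nil => simp [runTake, runGo]
  | cons e r ih =>
    obtain ⟨k, v⟩ := e
    by_cases hk : k ∈ seen
    · have hks : seen.contains k = true := (PySem.Set.contains_iff _ _).mpr hk
      have hrim : rim.contains k = true := by rw [h]; exact hks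
      simp only [List.foldl_cons, hrim, if_pos]
      have hm : ((ps.length : Int)).toNat = ps.length := by omega
      rw [show (ps ++ [cur] : List (List Int)) = ps ++ cur :: [] from rfl]
      rw [hm, modify_append_middle]
      rw [ih ps (cur ++ [v]) rim seen h]
      simp [runTake, hk]
    · have hks : seen.contains k = false := by
        simpa using (fun hc => hk ((PySem.Set.contains_iff _ _).mp hc))
      have hrim : rim.contains k = false := by rw [h]; exact hks
      simp only [List.foldl_cons, hrim, Bool.false_eq_true, if_false]
      have hm : ((ps.length : Int) + 1).toNat = ps.length + 1 := by omega
      have hsplit : (ps ++ [cur]) ++ [([] : List Int)] = (ps ++ [cur]) ++ [] :: [] := rfl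
      have hlen : ps.length + 1 = (ps ++ [cur]).length := by simp
      rw [hm, hsplit, hlen, modify_append_middle]
      have h' : ∀ k', (rim.insert k ((ps.length : Int) + 1)).contains k' = (seen.add k).contains k' := by
        intro k'
        rw [PySem.Dict.contains_insert, set_contains_add, h]
        by_cases hkk : k' = k <;> simp [hkk, Bool.or_comm]
      have := ih (ps ++ [cur]) ([] ++ [v]) (rim.insert k ((ps.length : Int) + 1)) (seen.add k) h'
      simp only [List.length_append, List.length_cons, List.length_nil, Nat.zero_add] at this
      push_cast at this
      rw [this]
      simp [runTake, hk, runGo]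

-- A's whole then-branch
theorem loopA_top (bucket : List (Int × Int)) :
    (bucket.foldl
      (fun (st : Int × PySem.Dict Int Int × List (List Int)) elem =>
        let st' :=
          if st.2.1.contains elem.1 then st
          else (st.1 + 1, st.2.1.insert elem.1 (st.1 + 1), st.2.2 ++ [[]])
        (st'.1, st'.2.1, st'.2.2.modify st'.1.toNat (fun g => g ++ [elem.2])))
      (-1, PySem.Dict.empty, [])).2.2 = runGo PySem.Set.empty bucket := by
  cases bucket with
  | nil => simp [runGo]
  | cons e r =>
    obtain ⟨k, v⟩ := e
    have hrim : (PySem.Dict.empty : PySem.Dict Int Int).contains k = false := by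
      simp [PySem.Dict.contains_empty]
    simp only [List.foldl_cons, hrim, Bool.false_eq_true, if_false]
    norm_num
    have h' : ∀ k', ((PySem.Dict.empty : PySem.Dict Int Int).insert k 0).contains k'
        = ((PySem.Set.empty : PySem.Set Int).add k).contains k' := by
      intro k'
      rw [PySem.Dict.contains_insert, set_contains_add]
      simp [PySem.Dict.contains_empty, PySem.Set.contains, PySem.Set.empty]
    have hgo := loopA r [] [v] ((PySem.Dict.empty : PySem.Dict Int Int).insert k 0) ((PySem.Set.empty : PySem.Set Int).add k) h'
    simp only [List.length_nil, Nat.cast_zero, List.nil_append] at hgo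
    rw [hgo]
    simp [runGo]

theorem loopElse (rest : List (Int × Int)) (cur : List Int) :
    rest.foldl (fun (parts : List (List Int)) elem => parts.modify 0 (fun g => g ++ [elem.2])) [cur]
      = [cur ++ rest.map (·.2)] := by
  induction rest generalizing cur with
  | nil => simp
  | cons e r ih =>
    simp only [List.foldl_cons]
    rw [show ([cur] : List (List Int)).modify 0 (fun g => g ++ [e.2]) = [cur ++ [e.2]] from by
      simp [List.modify]]
    rw [ih]
    simp

-- recursive form of B's boundary-collecting pass
def startsRec (seen : PySem.Set Int) : List (Int × Int) → Int → List Int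
  | [], _ => []
  | (k, _) :: rest, i =>
    if seen.contains k then startsRec seen rest (i + 1)
    else i :: startsRec (seen.add k) rest (i + 1)

theorem foldStarts (l : List (Int × Int)) (i : Int) (acc : List Int) (seen : PySem.Set Int) :
    ((PySem.List.enumerate l i).foldl
      (fun (ac : List Int × PySem.Set Int) p =>
        if ac.2.contains p.2.1 then ac else (ac.1 ++ [p.1], ac.2.add p.2.1))
      (acc, seen)).1 = acc ++ startsRec seen l i := by
  induction l generalizing i acc seen with
  | nil => simp [PySem.List.enumerate_nil, startsRec]
  | cons e r ih =>
    obtain ⟨k, v⟩ := e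
    rw [PySem.List.enumerate_cons]
    by_cases hk : k ∈ seen
    · have hks : seen.contains k = true := (PySem.Set.contains_iff _ _).mpr hk
      simp only [List.foldl_cons, hks, if_pos]
      rw [ih]
      simp [startsRec, hk]
    · have hks : seen.contains k = false := by
        simpa using (fun hc => hk ((PySem.Set.contains_iff _ _).mp hc))
      simp only [List.foldl_cons, hks, Bool.false_eq_true, if_false]
      rw [ih]
      simp [startsRec, hk]

-- the run taken by runTake is a prefix of values, the rest a drop
theorem runTake_spec (seen : PySem.Set Int) (l : List (Int × Int)) :
    (runTake seen l).1 = (l.take (runTake seen l).1.length).map (·.2) ∧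
    (runTake seen l).2 = l.drop (runTake seen l).1.length := by
  induction l with
  | nil => simp [runTake]
  | cons e r ih =>
    obtain ⟨k, v⟩ := e
    by_cases hk : k ∈ seen
    · have hks : seen.contains k = true := (PySem.Set.contains_iff _ _).mpr hk
      simp only [runTake, hks, if_pos]
      constructor
      · simp only [List.length_cons, List.take_succ_cons, List.map_cons]
        exact congrArg (v :: ·) ih.1
      · simpa using ih.2
    · simp [runTake, hk]

-- skipping a run adds no boundaries
theorem startsRec_skip (seen : PySem.Set Int) (l : List (Int × Int)) (i : Int) :
    startsRec seen l i = startsRec seen (runTake seen l).2 (i + (runTake seen l).1.length) := by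
  induction l generalizing i with
  | nil => simp [runTake]
  | cons e r ih =>
    obtain ⟨k, v⟩ := e
    by_cases hk : k ∈ seen
    · have hks : seen.contains k = true := (PySem.Set.contains_iff _ _).mpr hk
      simp only [runTake, hks, if_pos, startsRec]
      rw [ih]
      congr 1
      simp only [List.length_cons]
      push_cast
      ring
    · simp [runTake, startsRec, hk]

-- head of the rest after a run has an unseen key
theorem runTake_rest_head (seen : PySem.Set Int) (l : List (Int × Int)) (k : Int) (v : Int)
    (r' : List (Int × Int)) (h : (runTake seen l).2 = (k, v) :: r') :
    k ∉ seen := by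
  induction l with
  | nil => simp [runTake] at h
  | cons e r ih =>
    obtain ⟨k0, v0⟩ := e
    by_cases hk : k0 ∈ seen
    · have hks : seen.contains k0 = true := (PySem.Set.contains_iff _ _).mpr hk
      simp only [runTake, hks, if_pos] at h
      exact ih h
    · have hks : seen.contains k0 = false := by
        simpa using (fun hc => hk ((PySem.Set.contains_iff _ _).mp hc))
      simp only [runTake, hks, Bool.false_eq_true, if_false] at h
      obtain ⟨h1, -⟩ := List.cons.inj h
      obtain ⟨hk1, -⟩ := Prod.mk.injEq .. ▸ h1
      exact hk1 ▸ hk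

-- main lemma for B: slicing between boundaries computes runGo
theorem mainB (n : Nat) : ∀ (l : List (Int × Int)) (seen : PySem.Set Int) (i : Nat)
    (bucket : List (Int × Int)), l.length ≤ n → bucket.drop i = l →
    (∀ k v r', l = (k, v) :: r' → k ∉ seen) →
    ((startsRec seen l (i : Int)).zip
        ((startsRec seen l (i : Int)).drop 1 ++ [(bucket.length : Int)])).map
      (fun se => (PySem.List.slice bucket (some se.1) (some se.2)).map (·.2))
    = runGo seen l := by
  induction n with
  | zero =>
    intro l seen i bucket hn hd _
    have hl : l = [] := List.length_eq_zero_iff.mp (Nat.le_zero.mp hn)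
    subst hl
    simp [startsRec, runGo]
  | succ n ih =>
    intro l seen i bucket hn hd hhead
    cases l with
    | nil => simp [startsRec, runGo]
    | cons e rest =>
      obtain ⟨k, v⟩ := e
      have hk : k ∉ seen := hhead k v rest rfl
      have hks : seen.contains k = false := by
        simpa using (fun hc => hk ((PySem.Set.contains_iff _ _).mp hc))
      have hiLt : i < bucket.length := by
        have := congrArg List.length hd
        simp at this
        omega
      have hrest : bucket.drop (i + 1) = rest := by
        rw [← List.drop_drop (i := 1) (j := i), hd]
        simp
      set seen' := seen.add k with hseen'
      set g := (runTake seen' rest).1 with hg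
      set r := (runTake seen' rest).2 with hr
      have hspec := runTake_spec seen' rest
      rw [← hg, ← hr] at hspec
      have hs : startsRec seen ((k, v) :: rest) (i : Int) =
          (i : Int) :: startsRec seen' r ((i : Int) + 1 + (g.length : Int)) := by
        simp only [startsRec, hks, Bool.false_eq_true, if_false]
        rw [startsRec_skip seen' rest ((i : Int) + 1)]
      have hdropr : bucket.drop (i + 1 + g.length) = r := by
        rw [← List.drop_drop (i := g.length) (j := i + 1), hrest]
        exact hspec.2.symm
      clear_value seen' g r
      have hrlen : r.length ≤ n := by
        have := congrArg List.length hspec.2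
        simp only [List.length_drop] at this
        simp only [List.length_cons] at hn
        omega
      have hcast : ((i : Int) + 1 + (g.length : Int)) = (((i + 1 + g.length : Nat) : Int)) := by
        push_cast; ring
      have htake : (((k, v) :: rest).take (1 + g.length)).map (fun x => x.2) = v :: g := by
        rw [Nat.add_comm, List.take_succ_cons, List.map_cons]
        exact congrArg (v :: ·) hspec.1.symm
      -- the slice from i to the next boundary (or the end) is v :: g
      have hseg : ∀ (b : Int), b = (i : Int) + 1 + (g.length : Int) ∨ (b = (bucket.length : Int) ∧ r = []) →
          (PySem.List.slice bucket (some (i : Int)) (some b)).map (fun x => x.2) = v :: g := by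
        intro b hb
        cases hb with
        | inl hb =>
          subst hb
          rw [hcast]
          rw [PySem.List.slice_natCast]
          have heq : i + 1 + g.length - i = 1 + g.length := by omega
          rw [heq, hd, htake]
        | inr hb =>
          obtain ⟨hb, hre⟩ := hb
          subst hb
          rw [PySem.List.slice_natCast]
          have hglen : g.length ≤ rest.length := by
            have := congrArg List.length hspec.1
            simp only [List.length_map, List.length_take] at this
            omega
          have hrl : rest.length - g.length = 0 := by
            have h0 := hspec.2
            rw [hre] at h0
            have := congrArg List.length h0
            simp only [List.length_drop, List.length_nil] at this
            omega
          have hlb : bucket.length - i = rest.length + 1 := by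
            have := congrArg List.length hd
            simp only [List.length_drop, List.length_cons] at this
            omega
          have hlen2 : bucket.length - i = 1 + g.length := by omega
          rw [hlen2, hd, htake]
      rw [hs]
      cases hrc : r with
      | nil =>
        rw [show startsRec seen' ([] : List (Int × Int)) ((i : Int) + 1 + (g.length : Int)) = [] from rfl]
        simp only [List.drop_succ_cons, List.drop_zero, List.nil_append, List.zip_cons_cons,
          List.zip_nil_right, List.map_cons, List.map_nil]
        rw [hseg (bucket.length : Int) (Or.inr ⟨rfl, hrc⟩)]
        rw [show runGo seen ((k, v) :: rest) = (v :: g) :: runGo seen' r from by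
          simp [runGo, ← hseen', ← hg, ← hr]]
        rw [hrc]
        simp [runGo]
      | cons e' r' =>
        obtain ⟨k', v'⟩ := e'
        have hk' : k' ∉ seen' := runTake_rest_head seen' rest k' v' r' (hr ▸ hrc)
        have hsr : startsRec seen' ((k', v') :: r') ((i : Int) + 1 + (g.length : Int)) =
            ((i : Int) + 1 + (g.length : Int)) :: startsRec (seen'.add k') r' ((i : Int) + 1 + (g.length : Int) + 1) := by
          simp [startsRec, hk']
        have ihr := ih r seen' (i + 1 + g.length) bucket hrlen hdropr
          (by intro kk vv rr hrr
              rw [hrc] at hrr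
              obtain ⟨h1, -⟩ := List.cons.inj hrr
              obtain ⟨hk1, -⟩ := Prod.mk.injEq .. ▸ h1
              exact hk1 ▸ hk')
        rw [← hcast] at ihr
        rw [hrc] at ihr
        rw [hsr] at ihr ⊢
        simp only [List.drop_succ_cons, List.drop_zero] at ihr ⊢
        simp only [List.cons_append, List.zip_cons_cons, List.map_cons]
        rw [hseg ((i : Int) + 1 + (g.length : Int)) (Or.inl rfl)]
        rw [show runGo seen ((k, v) :: rest) = (v :: g) :: runGo seen' r from by
          simp [runGo, ← hseen', ← hg, ← hr]]
        rw [hrc, ihr]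
-- ===== VERDICT (by name: the statement is the Claim_ definition above) =====
theorem repartition_based_on_definition_spec : Claim_equal_repartition_based_on_definition := by
  intro bucket definition _
  unfold Spec_repartition_based_on_definition repartition_based_on_definition repartition_based_on_definition_alt
  by_cases hd : definition = 1
  · simp only [hd, if_pos, ne_eq, not_true_eq_false, if_false]
    rw [loopA_top]
    have hB : ((PySem.List.enumerate bucket 0).foldl
        (fun (ac : List Int × PySem.Set Int) p =>
          if ac.2.contains p.2.1 then ac else (ac.1 ++ [p.1], ac.2.add p.2.1))
        ([], PySem.Set.empty)).1 = startsRec PySem.Set.empty bucket 0 := by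
      simpa using foldStarts bucket 0 [] PySem.Set.empty
    rw [hB, PySem.List.slice_from_one]
    have hmain := mainB bucket.length bucket PySem.Set.empty 0 bucket le_rfl (by simp)
      (by intro k v r' _
          simp [PySem.Set.empty])
    simp only [Nat.cast_zero, List.drop_one] at hmain
    exact hmain.symm
  · simp only [hd, if_neg, ne_eq, not_false_eq_true, if_pos]
    have := loopElse bucket []
    simpa using this
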